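-- pv_equiv track=rewrite | github.com/safaeazz/valence_arousal_pred_videos | data_manager.py | len_lst_to_idx
-- ===== SOURCE A (Python) =====
-- def len_lst_to_idx(lst):
--     idx = []
--     st = 0
--     end = 0
--     for l in lst:
--         end = (end + l)
--         idx.append((st,end-1))
--         st =( st + l)-1
--     return idx
-- ===== SOURCE B (Python) =====
-- def len_lst_to_idx(lst):
--     # prefix-sum table, then one index-driven comprehension
--     ends = []
--     t = 0
--     for l in lst:
--         t += l
--         ends.append(t)
--     return [(e - l - i, e - 1) for i, (l, e) in enumerate(zip(lst, ends))]
-- ===== Notes on version B (the rewrite author's own statement) =====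
-- stated objective: alternative
-- what changed: Replaced A's two threaded mutable counters (st, end) with a prefix-sum table built once and a single index-driven comprehension computing each pair as (ends[i]-lst[i]-i, ends[i]-1).
import Mathlib
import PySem

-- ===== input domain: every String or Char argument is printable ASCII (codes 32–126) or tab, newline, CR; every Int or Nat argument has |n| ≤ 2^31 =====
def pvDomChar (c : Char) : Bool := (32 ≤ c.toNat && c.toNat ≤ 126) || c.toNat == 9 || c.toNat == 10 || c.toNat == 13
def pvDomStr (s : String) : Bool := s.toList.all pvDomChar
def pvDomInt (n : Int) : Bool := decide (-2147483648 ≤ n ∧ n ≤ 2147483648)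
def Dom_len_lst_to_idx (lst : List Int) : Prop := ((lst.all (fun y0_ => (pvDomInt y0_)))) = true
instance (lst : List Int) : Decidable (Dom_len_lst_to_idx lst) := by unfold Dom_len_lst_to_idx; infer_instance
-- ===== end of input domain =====

-- B replaces A's two running counters with a prefix-sum table plus index arithmetic (alternative decomposition, same cost).


-- ===== PORT A =====
def lenIdxLoop : List Int → Int → Int → List (Int × Int)
  | [], _, _ => []
  | l :: rest, st, e => (st, e + l - 1) :: lenIdxLoop rest (st + l - 1) (e + l)

def len_lst_to_idx (lst : List Int) : List (Int × Int) :=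
  lenIdxLoop lst 0 0

-- ===== PORT B =====
-- prefix-sum table (the `ends` loop in Source B)
def pvAccum : Int → List Int → List Int
  | _, [] => []
  | t, l :: r => (t + l) :: pvAccum (t + l) r

def len_lst_to_idx_alt (lst : List Int) : List (Int × Int) :=
  (PySem.List.enumerate (lst.zip (pvAccum 0 lst))).map
    (fun p => (p.2.2 - p.2.1 - p.1, p.2.2 - 1))

-- ===== PRECONDITION & SPEC =====
def Spec_len_lst_to_idx (lst : List Int) (out : List (Int × Int)) : Prop := out = len_lst_to_idx_alt lst
instance (lst : List Int) (out : List (Int × Int)) : Decidable (Spec_len_lst_to_idx lst out) := by unfold Spec_len_lst_to_idx; infer_instance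

-- ===== CLAIM (what is proved, stated in full; the proofs are below) =====
def Claim_equal_len_lst_to_idx : Prop := ∀ (lst : List Int), Dom_len_lst_to_idx lst → Spec_len_lst_to_idx lst (len_lst_to_idx lst)

-- ===== LEMMAS AND PROOFS =====
lemma lenIdxLoop_eq_enum : ∀ (lst : List Int) (e k : Int),
    lenIdxLoop lst (e - k) e =
      (PySem.List.enumerate (lst.zip (pvAccum e lst)) k).map
        (fun p => (p.2.2 - p.2.1 - p.1, p.2.2 - 1))
  | [], _, _ => rfl
  | l :: r, e, k => by
    have ih := lenIdxLoop_eq_enum r (e + l) (k + 1)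
    simp only [lenIdxLoop, pvAccum, List.zip_cons_cons, PySem.List.enumerate_cons, List.map_cons]
    have h1 : e - k + l - 1 = e + l - (k + 1) := by ring
    have h2 : e - k = e + l - l - k := by ring
    rw [h1, ih, h2]

-- ===== VERDICT (by name: the statement is the Claim_ definition above) =====
theorem len_lst_to_idx_spec : Claim_equal_len_lst_to_idx := by
  intro lst _
  unfold Spec_len_lst_to_idx len_lst_to_idx len_lst_to_idx_alt
  have := lenIdxLoop_eq_enum lst 0 0
  simpa using this
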